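-- pv_equiv track=rewrite | github.com/zirrostig/pyroll | pyroll.py | greater_gen
-- ===== SOURCE A (Python) =====
-- def greater_gen(probs):
--     probs_gt = {}
--     total = 0
--     for s in range(max(probs), 0, -1):
--         if s not in probs:
--             continue
--         probs_gt[s] = total
--         total += probs[s]
--
--     return probs_gt
-- ===== SOURCE B (Python) =====
-- def greater_gen(probs):
--     items = sorted((kv for kv in probs.items() if kv[0] > 0), key=lambda kv: kv[0])
--     total = 0
--     for kv in items:
--         total += kv[1]
--     pairs = []
--     for k, v in items:
--         total -= v
--         pairs.append((k, total))
--     return dict(reversed(pairs))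
-- ===== Notes on version B (the rewrite author's own statement) =====
-- stated objective: alternative
-- what changed: Instead of scanning every integer from max(probs) down to 1 with a dict-membership test and a forward running total, B sorts the positive items ascending once and builds the result by structural recursion computing suffix sums (each key's value is the total prob of the strictly greater keys above it in the recursion), O(n log n) in the number of keys instead of O(max key).
import Mathlib
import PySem

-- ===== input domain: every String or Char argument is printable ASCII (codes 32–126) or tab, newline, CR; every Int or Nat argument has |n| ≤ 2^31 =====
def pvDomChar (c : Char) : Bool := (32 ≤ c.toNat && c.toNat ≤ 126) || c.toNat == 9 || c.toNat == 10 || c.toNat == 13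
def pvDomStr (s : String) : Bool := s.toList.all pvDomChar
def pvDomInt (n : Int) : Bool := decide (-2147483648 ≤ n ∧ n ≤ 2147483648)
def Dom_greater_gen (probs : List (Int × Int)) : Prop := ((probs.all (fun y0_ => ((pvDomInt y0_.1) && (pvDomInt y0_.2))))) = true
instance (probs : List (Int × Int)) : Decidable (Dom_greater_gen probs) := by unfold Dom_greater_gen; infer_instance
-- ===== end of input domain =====

-- B replaces A's scan over every integer from max(probs) down to 1 by one ascending sort of the
-- positive items and a subtraction scan from the grand total, reversed into the result dict
-- (objective: alternative).

-- ===== PORT A =====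
-- probs_gt = {}; total = 0; for s in range(max(probs), 0, -1): skip if s not in probs,
-- else probs_gt[s] = total; total += probs[s]; return probs_gt
def greater_gen (probs : List (Int × Int)) : List (Int × Int) :=
  match PySem.List.max? (PySem.Dict.ofList probs).keys (fun x => x) with
  | none => []  -- unreachable under Pre_: max(probs) raises ValueError on an empty dict
  | some mx =>
    ((PySem.List.pyRange mx 0 (-1)).foldl
      (fun (acc : PySem.Dict Int Int × Int) s =>
        if (PySem.Dict.ofList probs).contains s then
          (acc.1.insert s acc.2, acc.2 + (PySem.Dict.ofList probs).getD s 0)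
        else acc)
      (PySem.Dict.empty, 0)).1.items

-- ===== PORT B =====
-- items = sorted((kv for kv in probs.items() if kv[0] > 0), key=lambda kv: kv[0])
-- total = 0; for kv in items: total += kv[1]
-- pairs = []; for k, v in items: total -= v; pairs.append((k, total))
-- return dict(reversed(pairs))
def greater_gen_alt (probs : List (Int × Int)) : List (Int × Int) :=
  let items := PySem.List.sorted
    ((PySem.Dict.ofList probs).items.filter (fun kv => decide (0 < kv.1))) (fun kv => kv.1) false
  let total := items.foldl (fun t kv => t + kv.2) 0
  let pairs := (items.foldl
    (fun (st : List (Int × Int) × Int) kv => (st.1 ++ [(kv.1, st.2 - kv.2)], st.2 - kv.2))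
    ([], total)).1
  (PySem.Dict.ofList pairs.reverse).items

-- ===== PRECONDITION & SPEC =====
-- Pre_ excludes only the empty dict, on which A's max(probs) raises ValueError (A returns on no excluded input).
def Pre_greater_gen (probs : List (Int × Int)) : Prop := probs ≠ []
instance (probs : List (Int × Int)) : Decidable (Pre_greater_gen probs) := by unfold Pre_greater_gen; infer_instance
def pvWitness_greater_gen : (List (Int × Int)) := [(3, 1), (1, 2), (7, 4), (-2, 5)]

def Spec_greater_gen (probs : List (Int × Int)) (out : List (Int × Int)) : Prop := out = greater_gen_alt probs
instance (probs : List (Int × Int)) (out : List (Int × Int)) : Decidable (Spec_greater_gen probs out) := by unfold Spec_greater_gen; infer_instance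

-- ===== CLAIM (what is proved, stated in full; the proofs are below) =====
def Claim_equal_greater_gen : Prop := ∀ (probs : List (Int × Int)), Dom_greater_gen probs → Pre_greater_gen probs → Spec_greater_gen probs (greater_gen probs)

-- ===== LEMMAS AND PROOFS =====

-- forward add-scan: the pair list A's loop inserts (each key paired with the running total so far)
def pvG (t : Int) : List (Int × Int) → List (Int × Int)
  | [] => []
  | (k, v) :: r => (k, t) :: pvG (t + v) r

-- forward subtract-scan: the pair list B's second loop appends
def pvH (t : Int) : List (Int × Int) → List (Int × Int)
  | [] => []
  | (k, v) :: r => (k, t - v) :: pvH (t - v) r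

def pvSumv (m : List (Int × Int)) : Int := (m.map (fun kv => kv.2)).sum

theorem pvSumv_cons (k v : Int) (r : List (Int × Int)) :
    pvSumv ((k, v) :: r) = v + pvSumv r := by simp [pvSumv]

theorem pvSumv_reverse (m : List (Int × Int)) : pvSumv m.reverse = pvSumv m := by
  simp [pvSumv]

theorem foldl_add_snd (m : List (Int × Int)) :
    ∀ t : Int, m.foldl (fun a kv => a + kv.2) t = t + pvSumv m := by
  induction m with
  | nil => intro t; simp [pvSumv]
  | cons x r ih =>
    intro t
    cases x with
    | mk k v => simp only [List.foldl_cons, ih, pvSumv_cons]; ring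

theorem foldl_append_sub (m : List (Int × Int)) :
    ∀ (acc : List (Int × Int)) (t : Int),
      (m.foldl (fun (st : List (Int × Int) × Int) kv =>
          (st.1 ++ [(kv.1, st.2 - kv.2)], st.2 - kv.2)) (acc, t)).1 = acc ++ pvH t m := by
  induction m with
  | nil => intro acc t; simp [pvH]
  | cons x r ih =>
    intro acc t
    cases x with
    | mk k v => simp [pvH, ih, List.append_assoc]

theorem pvH_append (m n : List (Int × Int)) :
    ∀ t : Int, pvH t (m ++ n) = pvH t m ++ pvH (t - pvSumv m) n := by
  induction m with
  | nil => intro t; simp [pvH, pvSumv]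
  | cons x r ih =>
    intro t
    cases x with
    | mk k v =>
      simp only [List.cons_append, pvH, ih, pvSumv_cons, List.cons.injEq, true_and]
      have : t - v - pvSumv r = t - (v + pvSumv r) := by ring
      rw [this]

theorem map_fst_pvH (m : List (Int × Int)) :
    ∀ t : Int, (pvH t m).map Prod.fst = m.map Prod.fst := by
  induction m with
  | nil => intro t; rfl
  | cons x r ih =>
    intro t
    cases x with
    | mk k v => simp [pvH, ih]

-- the add-scan of a list is the reverse of the subtract-scan (from the grand total) of its reverse
theorem pvG_eq_pvH_reverse (m : List (Int × Int)) :
    ∀ t : Int, pvG t m = (pvH (t + pvSumv m) m.reverse).reverse := by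
  induction m with
  | nil => intro t; simp [pvG, pvH]
  | cons x r ih =>
    intro t
    cases x with
    | mk k v =>
      simp only [pvG, List.reverse_cons, pvH_append, pvSumv_reverse, pvSumv_cons]
      have h1 : t + (v + pvSumv r) - pvSumv r = t + v := by ring
      rw [h1]
      have h2 : pvH (t + v) [(k, v)] = [(k, t)] := by
        simp [pvH]
      rw [h2]
      have h3 : t + (v + pvSumv r) = t + v + pvSumv r := by ring
      rw [h3, List.reverse_append, ← ih (t + v)]
      rfl

-- A's insertion loop over a fresh, duplicate-free key list appends exactly the add-scan pairs
theorem foldl_insert_items (d : PySem.Dict Int Int) :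
    ∀ (l : List Int) (dd : PySem.Dict Int Int) (t : Int), l.Nodup →
      (∀ s ∈ l, dd.contains s = false) →
      ((l.foldl (fun (acc : PySem.Dict Int Int × Int) s =>
          (acc.1.insert s acc.2, acc.2 + d.getD s 0)) (dd, t)).1).items
        = dd.items ++ pvG t (l.map (fun k => (k, d.getD k 0))) := by
  intro l
  induction l with
  | nil => intro dd t _ _; simp [pvG]
  | cons s r ih =>
    intro dd t hnd hfresh
    have hs : dd.contains s = false := hfresh s (by simp)
    have hfresh' : ∀ s' ∈ r, (dd.insert s t).contains s' = false := by
      intro s' hs'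
      rw [PySem.Dict.contains_insert]
      have hne : s' ≠ s := by
        intro h; exact (List.nodup_cons.mp hnd).1 (h ▸ hs')
      simp [hne, hfresh s' (List.mem_cons_of_mem _ hs')]
    simp only [List.foldl_cons, List.map_cons, pvG]
    rw [ih (dd.insert s t) (t + d.getD s 0) (List.nodup_cons.mp hnd).2 hfresh']
    rw [PySem.Dict.items_insert_of_not_contains dd t hs]
    simp [List.append_assoc]

-- a duplicate-free pair list rebuilt as a dict has exactly those items
theorem items_ofList_of_nodup (l : List (Int × Int)) (h : (l.map Prod.fst).Nodup) :
    (PySem.Dict.ofList l).items = l := by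
  show (l.foldl (fun (d : PySem.Dict Int Int) x => d.insert x.1 x.2) PySem.Dict.empty).items = l
  rw [PySem.Dict.items_foldl_insert_fresh l Prod.fst Prod.snd PySem.Dict.empty
      (fun a _ => PySem.Dict.contains_empty a.1) h]
  have he : PySem.Dict.empty.items = ([] : List (Int × Int)) := rfl
  simp [he]

-- folding with a guarded body = folding the filtered list
theorem foldl_if_eq_foldl_filter {α β : Type} (p : α → Bool) (f : β → α → β) :
    ∀ (l : List α) (init : β),
      l.foldl (fun acc x => if p x then f acc x else acc) init = (l.filter p).foldl f init := by
  intro l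
  induction l with
  | nil => intro init; rfl
  | cons x t ih =>
    intro init
    by_cases hx : p x = true
    · simp [hx, ih]
    · simp [hx, ih]

-- countdown pyRange is strictly decreasing
theorem pairwise_gt_pyRange_neg_one (a b : Int) :
    List.Pairwise (fun x y => y < x) (PySem.List.pyRange a b (-1)) := by
  rw [PySem.List.pyRange_neg_one_eq_reverse]
  rw [List.pairwise_reverse]
  exact PySem.List.pairwise_lt_pyRange_one _ _

theorem nodup_pyRange_neg_one (a b : Int) : (PySem.List.pyRange a b (-1)).Nodup := by
  rw [PySem.List.pyRange_neg_one_eq_reverse]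
  exact List.nodup_reverse.mpr (PySem.List.nodup_pyRange_one _ _)

-- the filtered countdown range IS the descending sort of the positive keys
theorem range_filter_eq_sorted (d : PySem.Dict Int Int) (mx : Int)
    (hmx : PySem.List.max? d.keys (fun x => x) = some mx) (hnd : d.keys.Nodup) :
    (PySem.List.pyRange mx 0 (-1)).filter (fun s => d.contains s)
      = PySem.List.sorted (d.keys.filter (fun k => decide (0 < k))) (fun x => x) true := by
  apply Eq.symm
  apply PySem.List.sorted_rev_eq_of_perm_of_pairwise_gt
  · rw [List.perm_ext_iff_of_nodup ((nodup_pyRange_neg_one mx 0).filter _) (hnd.filter _)]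
    intro s
    simp only [List.mem_filter, PySem.List.mem_pyRange_neg_one, decide_eq_true_eq]
    constructor
    · rintro ⟨⟨h0, _⟩, hc⟩
      exact ⟨(PySem.Dict.contains_iff_mem_keys d s).mp hc, h0⟩
    · rintro ⟨hk, h0⟩
      exact ⟨⟨h0, PySem.List.max?_isMax hmx s hk⟩, (PySem.Dict.contains_iff_mem_keys d s).mpr hk⟩
  · exact (pairwise_gt_pyRange_neg_one mx 0).filter _

-- pairing each positive key with its value gives exactly the filtered item list
theorem map_pair_keys_filter (d : PySem.Dict Int Int) (hnd : d.keys.Nodup) :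
    (d.keys.filter (fun k => decide (0 < k))).map (fun k => (k, d.getD k 0))
      = d.items.filter (fun kv => decide (0 < kv.1)) := by
  have hkeys : d.keys = d.items.map Prod.fst := rfl
  rw [hkeys, List.filter_map, List.map_map]
  have hpred : ((fun k : Int => decide (0 < k)) ∘ Prod.fst)
      = (fun kv : Int × Int => decide (0 < kv.1)) := rfl
  rw [hpred]
  conv_rhs => rw [← List.map_id (d.items.filter (fun kv : Int × Int => decide (0 < kv.1)))]
  apply List.map_congr_left
  intro kv hkv
  obtain ⟨k, v⟩ := kv
  have hmem : (k, v) ∈ d.items := List.mem_of_mem_filter hkv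
  have hg := PySem.Dict.getD_of_mem_items d hmem hnd 0
  simp [Function.comp, hg]

-- B's ascending item sort is the reverse of the descending key sort, paired with values
theorem sorted_items_eq_reverse (d : PySem.Dict Int Int) (hnd : d.keys.Nodup) :
    PySem.List.sorted (d.items.filter (fun kv => decide (0 < kv.1))) (fun kv => kv.1) false
      = (((PySem.List.sorted (d.keys.filter (fun k => decide (0 < k))) (fun x => x) true).map
          (fun k => (k, d.getD k 0))).reverse) := by
  apply PySem.List.sorted_eq_of_perm_of_pairwise_lt
  · have h1 : (((PySem.List.sorted (d.keys.filter (fun k => decide (0 < k))) (fun x => x) true).map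
          (fun k => (k, d.getD k 0))).reverse).Perm
        ((PySem.List.sorted (d.keys.filter (fun k => decide (0 < k))) (fun x => x) true).map
          (fun k => (k, d.getD k 0))) := List.reverse_perm _
    have h2 := (PySem.List.sorted_perm (d.keys.filter (fun k => decide (0 < k)))
        (fun x : Int => x) true).map (fun k => (k, d.getD k 0))
    rw [map_pair_keys_filter d hnd] at h2
    exact h1.trans h2
  · rw [List.pairwise_reverse, List.pairwise_map]
    have hsnd : (PySem.List.sorted (d.keys.filter (fun k => decide (0 < k))) (fun x => x) true).Nodup :=
      (PySem.List.sorted_perm _ _ _).nodup_iff.mpr (hnd.filter _)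
    have hle := PySem.List.sorted_pairwise_rev (d.keys.filter (fun k => decide (0 < k)))
      (fun x : Int => x)
    exact (hle.and hsnd).imp (by rintro a b ⟨h1, h2⟩; omega)

-- a nonempty association list yields a dict with a nonempty key list
theorem keys_ofList_ne_nil (probs : List (Int × Int)) (h : probs ≠ []) :
    (PySem.Dict.ofList probs).keys ≠ [] := by
  obtain ⟨p, t, rfl⟩ := List.exists_cons_of_ne_nil h
  intro hk
  have hmem : p.1 ∈ (PySem.Dict.ofList (p :: t)).keys := by
    show p.1 ∈ (List.foldl (fun d x => d.insert x.1 x.2) PySem.Dict.empty (p :: t)).keys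
    rw [show (fun (d : PySem.Dict Int Int) (x : Int × Int) => d.insert x.1 x.2)
        = fun d x => d.insert x.1 ((fun (_ : PySem.Dict Int Int) (y : Int × Int) => y.2) d x) from rfl]
    rw [PySem.Dict.keys_foldl_insert_key (p :: t) Prod.fst _ PySem.Dict.empty]
    rw [PySem.Dict.keys_empty]
    exact (PySem.Set.mem_update _ _ _).mpr (Or.inr (by simp))
  rw [hk] at hmem
  exact absurd hmem (List.not_mem_nil)

-- ===== VERDICT (by name: the statements are the Claim_ definitions above) =====
theorem greater_gen_spec : Claim_equal_greater_gen := by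
  intro probs _ hpre
  unfold Spec_greater_gen greater_gen greater_gen_alt
  have hne := keys_ofList_ne_nil probs hpre
  set d := PySem.Dict.ofList probs with hd
  have hnd : d.keys.Nodup := PySem.Dict.nodup_keys_ofList probs
  rcases hmx : PySem.List.max? d.keys (fun x => x) with _ | mx
  · exact absurd ((PySem.List.max?_eq_none_iff _ _).mp hmx) hne
  · show (List.foldl
        (fun (acc : PySem.Dict Int Int × Int) s =>
          if d.contains s = true then (acc.1.insert s acc.2, acc.2 + d.getD s 0) else acc)
        (PySem.Dict.empty, 0) (PySem.List.pyRange mx 0 (-1))).1.items = _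
    rw [foldl_if_eq_foldl_filter (fun s => d.contains s)
        (fun (acc : PySem.Dict Int Int × Int) s => (acc.1.insert s acc.2, acc.2 + d.getD s 0))]
    rw [range_filter_eq_sorted d mx hmx hnd]
    -- name the two sorted lists
    set Ldesc := PySem.List.sorted (d.keys.filter (fun k => decide (0 < k))) (fun x => x) true
      with hL
    have hLnd : Ldesc.Nodup :=
      (PySem.List.sorted_perm _ _ _).nodup_iff.mpr (hnd.filter _)
    -- A's side: the add-scan of the descending item list
    rw [foldl_insert_items d Ldesc PySem.Dict.empty 0 hLnd
        (fun s _ => PySem.Dict.contains_empty s)]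
    -- B's side
    have hAsc := sorted_items_eq_reverse d hnd
    rw [hAsc]
    dsimp only
    rw [foldl_append_sub, foldl_add_snd]
    set Mdesc := Ldesc.map (fun k => (k, d.getD k 0)) with hM
    have hMfst : Mdesc.map Prod.fst = Ldesc := by
      rw [hM, List.map_map]; exact List.map_id _
    have hkeys : ((pvH (0 + pvSumv Mdesc.reverse) Mdesc.reverse).reverse.map Prod.fst).Nodup := by
      rw [List.map_reverse, map_fst_pvH, List.map_reverse, hMfst]
      exact List.nodup_reverse.mpr (List.nodup_reverse.mpr hLnd)
    have hB := items_ofList_of_nodup ((pvH (0 + pvSumv Mdesc.reverse) Mdesc.reverse).reverse) hkeys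
    have he : PySem.Dict.empty.items = ([] : List (Int × Int)) := rfl
    rw [he, List.nil_append, List.nil_append, hB, pvG_eq_pvH_reverse Mdesc 0, pvSumv_reverse]
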